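-- pv_equiv track=rewrite | github.com/knowlet/reverse-skills | skills/reverse-golang-symbol-recovery/scripts/go_inventory.py | normalize_package
-- ===== SOURCE A (Python) =====
-- def normalize_package(symbol_name: str) -> str:
--     if ".(" in symbol_name:
--         return symbol_name.split(".(", 1)[0]
--
--     trimmed = symbol_name
--     while "." in trimmed:
--         head, tail = trimmed.rsplit(".", 1)
--         if tail.startswith("func") and tail[4:].isdigit():
--             trimmed = head
--             continue
--         if tail in {"deferwrap", "stub", "abi0", "abiinternal"}:
--             trimmed = head
--             continue
--         break
--
--     if "." not in trimmed:
--         return trimmed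
--     return trimmed.rsplit(".", 1)[0]
-- ===== SOURCE B (Python) =====
-- _SENTINELS = {"deferwrap", "stub", "abi0", "abiinternal"}
--
--
-- def _droppable(seg: str) -> bool:
--     return (seg.startswith("func") and seg[4:].isdigit()) or seg in _SENTINELS
--
--
-- def normalize_package(symbol_name: str) -> str:
--     if ".(" in symbol_name:
--         return symbol_name.split(".(", 1)[0]
--     # One forward pass: the kept prefix ends just before the RIGHTMOST
--     # non-droppable segment (at least one segment is always kept).
--     parts = symbol_name.split(".")
--     last = -1
--     for i, seg in enumerate(parts):
--         if not _droppable(seg):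
--             last = i
--     return ".".join(parts[:max(last, 1)])
-- ===== Notes on version B (the rewrite author's own statement) =====
-- stated objective: alternative
-- what changed: B replaces A's right-to-left while-loop that repeatedly rsplits and re-tests suffixes by a single left-to-right pass that records the index of the rightmost non-droppable segment and cuts the split list there once, using the fact that A's popping stops exactly at that segment.
import Mathlib
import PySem

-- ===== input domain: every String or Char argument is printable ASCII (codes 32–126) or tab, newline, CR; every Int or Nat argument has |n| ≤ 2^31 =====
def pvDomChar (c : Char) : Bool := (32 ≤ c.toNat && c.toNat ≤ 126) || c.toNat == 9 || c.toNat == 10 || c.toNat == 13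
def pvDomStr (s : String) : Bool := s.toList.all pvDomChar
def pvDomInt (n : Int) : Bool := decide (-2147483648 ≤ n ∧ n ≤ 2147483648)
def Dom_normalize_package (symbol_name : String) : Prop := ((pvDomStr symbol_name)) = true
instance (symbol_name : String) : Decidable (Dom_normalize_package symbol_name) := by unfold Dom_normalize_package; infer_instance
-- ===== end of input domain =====

-- B replaces A's right-to-left pop loop by ONE forward pass recording the rightmost
-- non-droppable segment and a single cut of the split list (objective: alternative).

-- ===== PORT A =====

-- s.rsplit(".", 1) for a string containing "." — ported by hand (no PySem rsplit):
-- exact, because for the single-character separator '.' the split at the LAST dot is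
-- "all pieces but the last re-joined" and "the last piece".
def pvRsplitDot1 (t : List Char) : List Char × List Char :=
  let ps := t.splitOn '.'
  (PySem.Chars.join ['.'] ps.dropLast, ps.getLastD [])

-- every piece of splitOn is free of the separator (used for pvLoopA's termination)
theorem pv_splitOnP_not_mem {α : Type} (p : α → Bool) (xs : List α) :
    ∀ l ∈ xs.splitOnP p, ∀ x ∈ l, ¬ p x := by
  induction xs with
  | nil => simp [List.splitOnP_nil]
  | cons a as ih =>
    rw [List.splitOnP_cons]
    by_cases hp : p a
    · simp only [hp, if_true]
      intro l hl
      rcases List.mem_cons.mp hl with rfl | h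
      · simp
      · exact ih l h
    · simp only [hp, Bool.false_eq_true, if_false]
      rcases hq : as.splitOnP p with _ | ⟨h0, t0⟩
      · exact absurd hq (List.splitOnP_ne_nil p as)
      · intro l hl
        simp only [List.modifyHead] at hl
        rcases List.mem_cons.mp hl with rfl | h
        · intro x hx
          rcases List.mem_cons.mp hx with rfl | hx'
          · exact hp
          · exact ih h0 (hq ▸ List.mem_cons_self) x hx'
        · exact ih l (hq ▸ List.mem_cons_of_mem _ h)

theorem pv_splitOn_not_mem (t : List Char) : ∀ l ∈ t.splitOn '.', '.' ∉ l := by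
  intro l hl hx
  exact pv_splitOnP_not_mem (· == '.') t l hl '.' hx (by simp)

theorem pv_join_getLast (ps : List (List Char)) (h : 2 ≤ ps.length) :
    PySem.Chars.join ['.'] ps =
      PySem.Chars.join ['.'] ps.dropLast ++ ['.'] ++ ps.getLastD [] := by
  induction ps with
  | nil => simp at h
  | cons a rest ih =>
    rcases rest with _ | ⟨b, rest'⟩
    · simp at h
    · rcases rest' with _ | ⟨c, rest''⟩
      · simp [PySem.Chars.join_cons_cons, PySem.Chars.join_singleton]
      · have h2 : 2 ≤ (b :: c :: rest'').length := by simp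
        rw [PySem.Chars.join_cons_cons, ih h2]
        have hd : (a :: b :: c :: rest'').dropLast = a :: (b :: c :: rest'').dropLast := by
          simp
        rw [hd]
        have hne : (b :: c :: rest'').dropLast = b :: (c :: rest'').dropLast := by simp
        rw [hne, PySem.Chars.join_cons_cons]
        simp [List.append_assoc]

theorem pv_mem_of_isIn (t : List Char) (h : PySem.Chars.isIn ['.'] t = true) : '.' ∈ t := by
  have := (PySem.Chars.isIn_iff_infix ['.'] t).mp h
  exact (List.singleton_infix_iff '.' t).mp this

theorem pv_two_le_splitOn (t : List Char) (h : '.' ∈ t) : 2 ≤ (t.splitOn '.').length := by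
  by_contra hlt
  push_neg at hlt
  have hne := List.splitOnP_ne_nil (· == '.') t
  rcases hq : t.splitOn '.' with _ | ⟨l, rest⟩
  · exact hne hq
  · rcases rest with _ | ⟨l2, rest'⟩
    · have hit : ['.'].intercalate [l] = t := by rw [← hq]; exact List.intercalate_splitOn t '.'
      simp [List.intercalate] at hit
      exact pv_splitOn_not_mem t l (by rw [hq]; exact List.mem_cons_self) (hit ▸ h)
    · rw [hq] at hlt; simp at hlt

theorem pv_join_splitOn (t : List Char) : PySem.Chars.join ['.'] (t.splitOn '.') = t := by
  show ['.'].intercalate (t.splitOn '.') = t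
  exact List.intercalate_splitOn t '.'

theorem pv_rsplit_fst_lt (t : List Char) (h : PySem.Chars.isIn ['.'] t = true) :
    (pvRsplitDot1 t).1.length < t.length := by
  have hmem := pv_mem_of_isIn t h
  have h2 := pv_two_le_splitOn t hmem
  have hjoin := pv_join_splitOn t
  have hsplit := pv_join_getLast (t.splitOn '.') h2
  rw [hjoin] at hsplit
  have hlen := congrArg List.length hsplit
  simp [List.length_append] at hlen
  show (PySem.Chars.join ['.'] ((t.splitOn '.').dropLast)).length < t.length
  omega

-- the while-loop of A: rsplit off the last '.'-component while it is a compiler artefact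
def pvLoopA (t : List Char) : List Char :=
  if h : PySem.Chars.isIn ['.'] t = true then
    let hd := (pvRsplitDot1 t).1
    let tl := (pvRsplitDot1 t).2
    if PySem.Chars.startswith tl "func".toList &&
         PySem.Chars.strIsdigit (PySem.List.slice tl (some 4) none) then
      pvLoopA hd
    else if PySem.Set.contains
        (PySem.Set.ofList ["deferwrap".toList, "stub".toList, "abi0".toList, "abiinternal".toList]) tl then
      pvLoopA hd
    else t
  else t
termination_by t.length
decreasing_by all_goals exact pv_rsplit_fst_lt t h

def normalize_package (symbol_name : String) : String :=
  let s := symbol_name.toList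
  if PySem.Chars.isIn ['.', '('] s then
    -- split(".(", 1)[0]: a str.split result is never empty, so [0] is its head
    String.mk (((PySem.Chars.splitMax? s ['.', '('] 1).getD [[]]).headD [])
  else
    let trimmed := pvLoopA s
    if !(PySem.Chars.isIn ['.'] trimmed) then String.mk trimmed
    else String.mk (pvRsplitDot1 trimmed).1

-- ===== PORT B =====

def pvSentinels : List (List Char) :=
  ["deferwrap".toList, "stub".toList, "abi0".toList, "abiinternal".toList]

def pvDroppable (seg : List Char) : Bool :=
  (PySem.Chars.startswith seg "func".toList &&
     PySem.Chars.strIsdigit (PySem.List.slice seg (some 4) none))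
  || PySem.Set.contains (PySem.Set.ofList pvSentinels) seg

-- B's forward pass: 'last = -1; for i, seg in enumerate(parts): if not _droppable(seg): last = i'
def pvLastIdx (parts : List (List Char)) : Int :=
  (PySem.List.enumerate parts 0).foldl
    (fun acc p => if !pvDroppable p.2 then p.1 else acc) (-1)

def normalize_package_alt (symbol_name : String) : String :=
  let s := symbol_name.toList
  if PySem.Chars.isIn ['.', '('] s then
    -- split(".(", 1)[0]: a str.split result is never empty, so [0] is its head
    String.mk (((PySem.Chars.splitMax? s ['.', '('] 1).getD [[]]).headD [])
  else
    -- symbol_name.split("."): exact for the single-character separator '.'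
    let parts := s.splitOn '.'
    let last := pvLastIdx parts
    String.mk (PySem.Chars.join ['.'] (PySem.List.slice parts none (some (max last 1))))

-- ===== PRECONDITION & SPEC =====
def Spec_normalize_package (symbol_name : String) (out : String) : Prop := out = normalize_package_alt symbol_name
instance (symbol_name : String) (out : String) : Decidable (Spec_normalize_package symbol_name out) := by unfold Spec_normalize_package; infer_instance

-- ===== CLAIM (what is proved, stated in full; the proofs are below) =====
def Claim_equal_normalize_package : Prop := ∀ (symbol_name : String), Dom_normalize_package symbol_name → Spec_normalize_package symbol_name (normalize_package symbol_name)

-- ===== LEMMAS AND PROOFS =====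

theorem pv_isIn_of_mem (t : List Char) (h : '.' ∈ t) : PySem.Chars.isIn ['.'] t = true :=
  (PySem.Chars.isIn_iff_infix ['.'] t).mpr ((List.singleton_infix_iff '.' t).mpr h)

-- the two cores (the non-'.('-branches of the two ports), for stating the induction
def pvACore (t : List Char) : List Char :=
  if !(PySem.Chars.isIn ['.'] (pvLoopA t)) then pvLoopA t
  else (pvRsplitDot1 (pvLoopA t)).1

def pvBCore (t : List Char) : List Char :=
  PySem.Chars.join ['.']
    (PySem.List.slice (t.splitOn '.') none (some (max (pvLastIdx (t.splitOn '.')) 1)))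

-- appending one segment to the scanned list either overwrites 'last' or keeps it
theorem pv_lastIdx_append (ps : List (List Char)) (a : List Char) :
    pvLastIdx (ps ++ [a]) =
      if pvDroppable a then pvLastIdx ps else (ps.length : Int) := by
  unfold pvLastIdx
  rw [PySem.List.enumerate_append, List.foldl_append]
  simp only [PySem.List.enumerate_cons, PySem.List.enumerate_nil, List.foldl_cons, List.foldl_nil]
  cases h : pvDroppable a <;> simp [h]

theorem pv_lastIdx_bounds (ps : List (List Char)) :
    -1 ≤ pvLastIdx ps ∧ pvLastIdx ps ≤ (ps.length : Int) - 1 := by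
  induction ps using List.reverseRecOn with
  | nil => simp [pvLastIdx, PySem.List.enumerate_nil]
  | append_singleton ps a ih =>
    rw [pv_lastIdx_append]
    rcases ih with ⟨h1, h2⟩
    split <;> simp [List.length_append] <;> omega

theorem pv_splitOn_dropLast (t : List Char) (h2 : 2 ≤ (t.splitOn '.').length) :
    (PySem.Chars.join ['.'] ((t.splitOn '.').dropLast)).splitOn '.' = (t.splitOn '.').dropLast := by
  show List.splitOn '.' (['.'].intercalate ((t.splitOn '.').dropLast)) = (t.splitOn '.').dropLast
  apply List.splitOn_intercalate
  · intro l hl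
    exact pv_splitOn_not_mem t l (List.mem_of_mem_dropLast hl)
  · intro hc
    have := congrArg List.length hc
    simp at this
    omega

-- B's final slice, in Nat form
theorem pv_bcore_take (t : List Char) :
    pvBCore t = PySem.Chars.join ['.']
      ((t.splitOn '.').take (max (pvLastIdx (t.splitOn '.')) 1).toNat) := by
  unfold pvBCore
  rw [PySem.List.slice_to _ (by omega)]

-- one unfolding of A's loop, phrased with pvDroppable
theorem pv_loopA_step (t : List Char) (h : PySem.Chars.isIn ['.'] t = true) :
    pvLoopA t = if pvDroppable (pvRsplitDot1 t).2 then pvLoopA (pvRsplitDot1 t).1 else t := by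
  rw [pvLoopA, dif_pos h]
  simp only [pvDroppable, pvSentinels]
  simp only [Bool.or_eq_true, Bool.and_eq_true]
  split_ifs <;> first | rfl | tauto

-- a nonempty list is its dropLast plus its getLastD
theorem pv_dropLast_append (ps : List (List Char)) (h : ps ≠ []) :
    ps.dropLast ++ [ps.getLastD []] = ps := by
  rw [List.getLastD_eq_getLast?, List.getLast?_eq_some_getLast h]
  simp [List.dropLast_concat_getLast h]

theorem pv_main : ∀ (t : List Char), pvACore t = pvBCore t := by
  intro t
  generalize hn : t.length = n
  induction n using Nat.strong_induction_on generalizing t with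
  | _ n ih =>
  rw [pv_bcore_take]
  by_cases hdot : PySem.Chars.isIn ['.'] t = true
  · -- '.' in t
    have hmem := pv_mem_of_isIn t hdot
    have h2 := pv_two_le_splitOn t hmem
    obtain ⟨k, hk⟩ : ∃ k, (t.splitOn '.').length = k + 2 := ⟨(t.splitOn '.').length - 2, by omega⟩
    have hne : t.splitOn '.' ≠ [] := by intro hc; rw [hc] at hk; simp at hk
    have htail : (pvRsplitDot1 t).2 = (t.splitOn '.').getLastD [] := rfl
    have hsplit := pv_dropLast_append (t.splitOn '.') hne
    have happ := pv_lastIdx_append ((t.splitOn '.').dropLast) ((t.splitOn '.').getLastD [])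
    rw [hsplit] at happ
    by_cases hdrop : pvDroppable (pvRsplitDot1 t).2 = true
    · -- droppable last segment: A recurses on the head, B's 'last' ignores the last segment
      have hstep := pv_loopA_step t hdot
      rw [if_pos hdrop] at hstep
      have hlt := pv_rsplit_fst_lt t hdot
      have hih := ih ((pvRsplitDot1 t).1.length) (by omega) (pvRsplitDot1 t).1 rfl
      have hA : pvACore t = pvACore (pvRsplitDot1 t).1 := by
        unfold pvACore; rw [hstep]
      rw [hA, hih, pv_bcore_take]
      have hps : ((pvRsplitDot1 t).1).splitOn '.' = (t.splitOn '.').dropLast :=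
        pv_splitOn_dropLast t h2
      rw [hps]
      have hLeq : pvLastIdx ((t.splitOn '.').dropLast) = pvLastIdx (t.splitOn '.') := by
        rw [happ, if_pos (htail ▸ hdrop)]
      rw [hLeq]
      have hb := pv_lastIdx_bounds (t.splitOn '.')
      have hb' := pv_lastIdx_bounds ((t.splitOn '.').dropLast)
      rw [hLeq] at hb'
      have hlen : ((t.splitOn '.').dropLast).length = k + 1 := by
        simp [List.length_dropLast, hk]
      rw [hlen] at hb'
      congr 1
      rw [List.dropLast_eq_take, List.take_take, hk]
      congr 1
      omega
    · -- last segment kept: A breaks out and rsplits once more; B's 'last' is the last index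
      have hstep := pv_loopA_step t hdot
      rw [if_neg hdrop] at hstep
      have hA : pvACore t = (pvRsplitDot1 t).1 := by
        unfold pvACore
        rw [hstep, hdot]
        simp
      rw [hA]
      have hL : pvLastIdx (t.splitOn '.') = ((k : Int) + 1) := by
        rw [happ, if_neg (htail ▸ hdrop)]
        simp [List.length_dropLast, hk]
      rw [hL]
      show PySem.Chars.join ['.'] ((t.splitOn '.').dropLast)
          = PySem.Chars.join ['.'] ((t.splitOn '.').take (max ((k : Int) + 1) 1).toNat)
      congr 1
      rw [List.dropLast_eq_take, hk]
      congr 1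
      omega
  · -- no '.' in t: both sides return t unchanged
    have hdot' : PySem.Chars.isIn ['.'] t = false := by
      revert hdot; cases PySem.Chars.isIn ['.'] t <;> simp
    have hloop : pvLoopA t = t := by rw [pvLoopA]; simp [hdot']
    have hA : pvACore t = t := by unfold pvACore; rw [hloop, hdot']; simp
    have hsingle : t.splitOn '.' = [t] := by
      apply List.splitOnP_eq_single
      intro x hx
      simp only [beq_iff_eq]
      intro hx'
      exact hdot (pv_isIn_of_mem t (hx' ▸ hx))
    rw [hA, hsingle]
    have : pvLastIdx [t] = if pvDroppable t then (-1 : Int) else 0 := by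
      have := pv_lastIdx_append [] t
      simpa [pvLastIdx, PySem.List.enumerate_nil] using this
    rw [this]
    split <;> simp [PySem.Chars.join_singleton]

-- ===== VERDICT (by name: the statement is the Claim_ definition above) =====
theorem normalize_package_spec : Claim_equal_normalize_package := by
  intro s _
  unfold Spec_normalize_package normalize_package normalize_package_alt
  simp only
  by_cases h : PySem.Chars.isIn ['.', '('] s.toList = true
  · simp [h]
  · simp only [h, Bool.false_eq_true, if_false]
    rw [← apply_ite String.mk]
    exact congrArg String.mk (pv_main s.toList)
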